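-- pv_equiv track=rewrite | github.com/IgnacioMarianoMoscaUNLP/ResolucionesTallerProblemas | #jolly jumper.py | num_hartals
-- ===== SOURCE A (Python) =====
-- def num_hartals(parties,days):
--     i=0
--     days_with_hartals = set()
--     for day in range(1,days+1):
--         for p in parties:
--             if((day == p)or(day %p==0)):
--                 days_with_hartals.add(day)
--     return len(days_with_hartals)
-- ===== SOURCE B (Python) =====
-- def num_hartals(parties, days):
--     marked = set()
--     for p in parties:
--         q = abs(p)
--         if q:
--             marked.update(range(q, days + 1, q))
--     return len(marked)
-- ===== Notes on version B (the rewrite author's own statement) =====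
-- stated objective: faster
-- what changed: Replaces the day-by-day scan testing every party (O(days*|parties|)) with a sieve that, for each nonzero party period p, marks the multiples of |p| up to days and counts the marked set.
import Mathlib
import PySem

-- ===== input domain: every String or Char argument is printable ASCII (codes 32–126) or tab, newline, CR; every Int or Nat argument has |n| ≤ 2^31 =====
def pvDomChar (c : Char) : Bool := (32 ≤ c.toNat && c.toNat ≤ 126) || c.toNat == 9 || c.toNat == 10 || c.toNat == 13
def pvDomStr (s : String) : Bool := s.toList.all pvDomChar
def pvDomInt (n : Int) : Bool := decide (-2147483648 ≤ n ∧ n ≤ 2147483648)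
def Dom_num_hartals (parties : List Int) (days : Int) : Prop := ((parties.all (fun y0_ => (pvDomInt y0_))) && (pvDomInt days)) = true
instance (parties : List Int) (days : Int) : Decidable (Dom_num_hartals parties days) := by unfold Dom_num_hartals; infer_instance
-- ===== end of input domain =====

-- B replaces A's day-by-day scan over all parties with a sieve marking the multiples
-- of each party's period; objective: faster (asymptotically fewer marking steps).
-- Both Pythons use a 'set' consumed only through add/update/len (never its iteration
-- order), so each port carries it as Std.HashSet — exact for those operations, and it
-- keeps set insertion O(1) so the ports evaluate on large 'days'.

-- ===== PORT A =====
-- literal port: for day in range(1, days+1): for p in parties: if (day == p) or (day % p == 0): add day; return len(set)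
def num_hartals (parties : List Int) (days : Int) : Int :=
  let days_with_hartals : Std.HashSet Int :=
    (PySem.List.pyRange 1 (days + 1) 1).foldl
      (fun s day =>
        parties.foldl
          (fun s p =>
            if day == p || PySem.Int.mod day p == 0 then s.insert day else s)
          s)
      (Std.HashSet.emptyWithCapacity 8)
  (days_with_hartals.size : Int)

-- ===== PORT B =====
-- literal port of Source B: for p in parties: q = abs(p); if q: marked.update(range(q, days+1, q)); return len(marked)
def num_hartals_alt (parties : List Int) (days : Int) : Int :=
  let marked : Std.HashSet Int :=
    parties.foldl
      (fun s p =>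
        if |p| ≠ 0 then
          (PySem.List.pyRange |p| (days + 1) |p|).foldl (fun s d => s.insert d) s
        else s)
      (Std.HashSet.emptyWithCapacity 8)
  (marked.size : Int)

-- ===== PRECONDITION & SPEC =====
-- Pre_ excludes exactly the inputs where A raises: 0 ∈ parties with days ≥ 1 makes A's day % p
-- a ZeroDivisionError on the first day of the loop (B skips a zero period and returns a count there).
def Pre_num_hartals (parties : List Int) (days : Int) : Prop := ¬((0 : Int) ∈ parties ∧ 1 ≤ days)
instance (parties : List Int) (days : Int) : Decidable (Pre_num_hartals parties days) := by unfold Pre_num_hartals; infer_instance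

def pvWitness_num_hartals : List Int × Int := ([2, 3], 10)

def Spec_num_hartals (parties : List Int) (days : Int) (out : Int) : Prop := out = num_hartals_alt parties days
instance (parties : List Int) (days : Int) (out : Int) : Decidable (Spec_num_hartals parties days out) := by unfold Spec_num_hartals; infer_instance

-- ===== CLAIM (what is proved, stated in full; the proofs are below) =====
def Claim_equal_num_hartals : Prop := ∀ (parties : List Int) (days : Int), Dom_num_hartals parties days → Pre_num_hartals parties days → Spec_num_hartals parties days (num_hartals parties days)

-- ===== LEMMAS AND PROOFS =====

-- the hartal condition A tests for a day
def pvHit (parties : List Int) (day : Int) : Prop := ∃ p ∈ parties, day = p ∨ PySem.Int.mod day p = 0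

theorem pvHit_cons (p : Int) (ps : List Int) (d : Int) :
    pvHit (p :: ps) d ↔ (d = p ∨ PySem.Int.mod d p = 0) ∨ pvHit ps d := by
  unfold pvHit
  constructor
  · rintro ⟨q, hq, hc⟩
    rcases List.mem_cons.mp hq with rfl | hq
    · exact Or.inl hc
    · exact Or.inr ⟨q, hq, hc⟩
  · rintro (hc | ⟨q, hq, hc⟩)
    · exact ⟨p, by simp, hc⟩
    · exact ⟨q, List.mem_cons_of_mem _ hq, hc⟩

-- A's inner loop: membership
theorem pvA_inner_mem (parties : List Int) (day x : Int) (s : Std.HashSet Int) :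
    (x ∈ parties.foldl
        (fun s p => if day == p || PySem.Int.mod day p == 0 then s.insert day else s) s) ↔
      x ∈ s ∨ (x = day ∧ pvHit parties day) := by
  induction parties generalizing s with
  | nil => simp [pvHit]
  | cons p ps ih =>
    simp only [List.foldl_cons]
    by_cases h : (day == p || PySem.Int.mod day p == 0) = true
    · have hc : day = p ∨ PySem.Int.mod day p = 0 := by simpa [beq_iff_eq] using h
      rw [if_pos h, ih, pvHit_cons]
      simp only [Std.HashSet.mem_insert, beq_iff_eq]
      tauto
    · have hc : ¬(day = p ∨ PySem.Int.mod day p = 0) := by simpa [beq_iff_eq] using h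
      rw [if_neg h, ih, pvHit_cons]
      tauto

-- A's outer loop: membership over an arbitrary list of days
theorem pvA_outer_mem (parties : List Int) (ds : List Int) (x : Int) (s : Std.HashSet Int) :
    (x ∈ ds.foldl
        (fun s day => parties.foldl
          (fun s p => if day == p || PySem.Int.mod day p == 0 then s.insert day else s) s) s) ↔
      x ∈ s ∨ (x ∈ ds ∧ pvHit parties x) := by
  induction ds generalizing s with
  | nil => simp
  | cons d ds ih =>
    simp only [List.foldl_cons, ih, pvA_inner_mem, List.mem_cons]
    constructor
    · rintro ((hx | ⟨rfl, hc⟩) | ⟨hx, hc⟩)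
      · exact Or.inl hx
      · exact Or.inr ⟨Or.inl rfl, hc⟩
      · exact Or.inr ⟨Or.inr hx, hc⟩
    · rintro (hx | ⟨rfl | hx, hc⟩)
      · exact Or.inl (Or.inl hx)
      · exact Or.inl (Or.inr ⟨rfl, hc⟩)
      · exact Or.inr ⟨hx, hc⟩

-- a plain foldl-insert is membership-wise a union
theorem pvFold_insert_mem (l : List Int) (x : Int) (s : Std.HashSet Int) :
    (x ∈ l.foldl (fun s d => s.insert d) s) ↔ x ∈ s ∨ x ∈ l := by
  induction l generalizing s with
  | nil => simp
  | cons d ds ih =>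
    simp only [List.foldl_cons, ih, Std.HashSet.mem_insert, beq_iff_eq, List.mem_cons]
    tauto

-- B's loop: membership
theorem pvB_mem (parties : List Int) (days x : Int) (s : Std.HashSet Int) :
    (x ∈ parties.foldl
        (fun s p =>
          if |p| ≠ 0 then
            (PySem.List.pyRange |p| (days + 1) |p|).foldl (fun s d => s.insert d) s
          else s) s) ↔
      x ∈ s ∨ ∃ p ∈ parties, |p| ≠ 0 ∧ x ∈ PySem.List.pyRange |p| (days + 1) |p| := by
  induction parties generalizing s with
  | nil => simp
  | cons p ps ih =>
    simp only [List.foldl_cons]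
    by_cases h : |p| ≠ 0
    · rw [if_pos h, ih]
      simp only [pvFold_insert_mem, List.mem_cons]
      constructor
      · rintro ((hx | hx) | ⟨q, hq, hn, hc⟩)
        · exact Or.inl hx
        · exact Or.inr ⟨p, Or.inl rfl, h, hx⟩
        · exact Or.inr ⟨q, Or.inr hq, hn, hc⟩
      · rintro (hx | ⟨q, rfl | hq, hn, hc⟩)
        · exact Or.inl (Or.inl hx)
        · exact Or.inl (Or.inr hc)
        · exact Or.inr ⟨q, hq, hn, hc⟩
    · rw [if_neg h, ih]
      simp only [List.mem_cons]
      constructor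
      · rintro (hx | ⟨q, hq, hn, hc⟩)
        · exact Or.inl hx
        · exact Or.inr ⟨q, Or.inr hq, hn, hc⟩
      · rintro (hx | ⟨q, rfl | hq, hn, hc⟩)
        · exact Or.inl hx
        · exact absurd hn h
        · exact Or.inr ⟨q, hq, hn, hc⟩

-- the two conditions agree for every day 1 ≤ x ≤ days when no party is 0
theorem pvCond_iff (parties : List Int) (days x : Int) (h0 : (0 : Int) ∉ parties)
    (hx1 : 1 ≤ x) (hxd : x ≤ days) :
    pvHit parties x ↔ ∃ p ∈ parties, |p| ≠ 0 ∧ x ∈ PySem.List.pyRange |p| (days + 1) |p| := by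
  constructor
  · rintro ⟨p, hp, hc⟩
    have hpne : p ≠ 0 := fun h => h0 (h ▸ hp)
    have habs : (0 : Int) < |p| := abs_pos.mpr hpne
    have hdvd : |p| ∣ x := by
      rcases hc with h | hc
      · rw [h]; exact (abs_dvd p p).mpr dvd_rfl
      · exact (abs_dvd p x).mpr ((PySem.Int.mod_eq_zero_iff_dvd x p).mp hc)
    refine ⟨p, hp, by omega, (PySem.List.mem_pyRange_iff_of_pos habs x).mpr ⟨?_, by omega, ?_⟩⟩
    · exact Int.le_of_dvd (by omega) hdvd
    · exact dvd_sub hdvd dvd_rfl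
  · rintro ⟨p, hp, hn, hc⟩
    have habs : (0 : Int) < |p| := lt_of_le_of_ne (abs_nonneg p) (Ne.symm hn)
    obtain ⟨-, -, hdvd⟩ := (PySem.List.mem_pyRange_iff_of_pos habs x).mp hc
    have hdx : |p| ∣ x := (Int.dvd_add_right dvd_rfl).mp (by simpa using (dvd_add hdvd dvd_rfl))
    exact ⟨p, hp, Or.inr ((PySem.Int.mod_eq_zero_iff_dvd x p).mpr ((abs_dvd p x).mp hdx))⟩

-- two hash sets with the same members have the same size
theorem pvHashSet_size_eq_of_mem_iff (s t : Std.HashSet Int)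
    (h : ∀ x, x ∈ s ↔ x ∈ t) : s.size = t.size := by
  have hs : s.toList.Nodup := by
    have := Std.HashSet.distinct_toList (m := s)
    exact this.imp (by simp)
  have ht : t.toList.Nodup := by
    have := Std.HashSet.distinct_toList (m := t)
    exact this.imp (by simp)
  have hperm : s.toList.Perm t.toList := by
    rw [List.perm_ext_iff_of_nodup hs ht]
    intro x
    rw [Std.HashSet.mem_toList, Std.HashSet.mem_toList]
    exact h x
  calc s.size = s.toList.length := Std.HashSet.length_toList.symm
    _ = t.toList.length := hperm.length_eq
    _ = t.size := Std.HashSet.length_toList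

-- ===== VERDICT (by name: the statement is the Claim_ definition above) =====
theorem num_hartals_spec : Claim_equal_num_hartals := by
  intro parties days _ hpre
  unfold Spec_num_hartals num_hartals num_hartals_alt
  have hsize :
      ((PySem.List.pyRange 1 (days + 1) 1).foldl
          (fun s day => parties.foldl
            (fun s p => if day == p || PySem.Int.mod day p == 0 then s.insert day else s) s)
          (Std.HashSet.emptyWithCapacity 8)).size =
        (parties.foldl
          (fun s p =>
            if |p| ≠ 0 then
              (PySem.List.pyRange |p| (days + 1) |p|).foldl (fun s d => s.insert d) s
            else s)
          (Std.HashSet.emptyWithCapacity 8)).size := by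
    apply pvHashSet_size_eq_of_mem_iff
    intro x
    rw [pvA_outer_mem, pvB_mem]
    simp only [Std.HashSet.not_mem_emptyWithCapacity, false_or]
    rw [PySem.List.mem_pyRange_one]
    constructor
    · rintro ⟨⟨hx1, hx2⟩, hc⟩
      have h0 : (0 : Int) ∉ parties := fun hm => hpre ⟨hm, by omega⟩
      exact (pvCond_iff parties days x h0 hx1 (by omega)).mp hc
    · intro hc
      rcases hc with ⟨p, hp, hn, hmem⟩
      have habs : (0 : Int) < |p| := lt_of_le_of_ne (abs_nonneg p) (Ne.symm hn)
      obtain ⟨hax, hxb, -⟩ := (PySem.List.mem_pyRange_iff_of_pos habs x).mp hmem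
      have hx1 : 1 ≤ x := by omega
      have h0 : (0 : Int) ∉ parties := fun hm => hpre ⟨hm, by omega⟩
      exact ⟨⟨hx1, by omega⟩, (pvCond_iff parties days x h0 hx1 (by omega)).mpr ⟨p, hp, hn, hmem⟩⟩
  exact_mod_cast congrArg Int.ofNat hsize
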